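-- pv_equiv track=rewrite | github.com/leon1991lin/leetCode_pretice | LeetCode_Increasing Decreasing String.py | sortString
-- ===== SOURCE A (Python) =====
-- def sortString(s: str) -> str:
--     count = {}
--     for c in s:
--         if c in count.keys():
--             count[c] += 1
--         else:
--             count[c] = 1
--     result = ""
--     while sum(count.values()) > 0:
--
--         for n in sorted(count.keys()):
--             if count[n] > 0:
--                 result += n
--                 count[n] -= 1
--
--         for n in sorted(count, reverse=True):
--             if count[n] > 0:
--                 result += n
--                 count[n] -= 1
--
--     return result
-- ===== SOURCE B (Python) =====
-- def sortString(s: str) -> str: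
--     cnt = {}
--     for c in s:
--         cnt[c] = cnt.get(c, 0) + 1
--     keys = sorted(cnt)
--     K = len(keys)
--     occ = []
--     for i, c in enumerate(keys):
--         for j in range(cnt[c]):
--             pos = i if j % 2 == 0 else K - 1 - i
--             occ.append((j * K + pos, c))
--     occ.sort(key=lambda t: t[0])
--     return "".join(c for _, c in occ)
-- ===== Notes on version B (the rewrite author's own statement) =====
-- stated objective: alternative
-- what changed: A repeatedly walks the sorted keys forwards and backwards, decrementing a mutable count dict and re-summing the remaining counts until they reach zero; B instead assigns every occurrence of every character a numeric schedule slot (j*K + position, K = number of distinct characters) and obtains the answer by one stable sort of these slots - no round loop, no mutation, no rescans.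
import Mathlib
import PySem

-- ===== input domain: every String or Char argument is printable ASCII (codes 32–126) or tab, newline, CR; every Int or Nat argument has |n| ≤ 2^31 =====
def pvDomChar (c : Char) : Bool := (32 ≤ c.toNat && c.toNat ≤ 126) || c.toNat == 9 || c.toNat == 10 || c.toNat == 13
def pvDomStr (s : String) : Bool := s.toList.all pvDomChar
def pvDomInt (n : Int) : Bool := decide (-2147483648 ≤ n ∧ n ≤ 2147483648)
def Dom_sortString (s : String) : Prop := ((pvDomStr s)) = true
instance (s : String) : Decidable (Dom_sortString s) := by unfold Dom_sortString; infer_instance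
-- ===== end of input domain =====

-- B replaces A's repeated mutate-and-rescan zigzag rounds by a schedule: each occurrence of each
-- character gets a numeric slot, and one stable sort of the slots yields the answer (objective: alternative).

-- ===== PORT A =====
-- the body shared by A's two inner for-loops: emit n and decrement when its count is positive
def pvStep (p : List Char × PySem.Dict Char Int) (n : Char) : List Char × PySem.Dict Char Int :=
  if p.2.getD n 0 > 0 then (p.1 ++ [n], p.2.insert n (p.2.getD n 0 - 1)) else p

-- one iteration of A's while-loop: ascending pass then descending pass
def pvRoundA (p : List Char × PySem.Dict Char Int) : List Char × PySem.Dict Char Int :=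
  let p1 := (PySem.List.sorted p.2.keys (fun c => c) false).foldl pvStep p
  (PySem.List.sorted p1.2.keys (fun c => c) true).foldl pvStep p1

-- A's while-loop; the fuel only makes the recursion total (s.length + 1 iterations always suffice)
def pvLoopA : Nat → List Char × PySem.Dict Char Int → List Char
  | 0, p => p.1
  | fuel+1, p => if p.2.values.sum > 0 then pvLoopA fuel (pvRoundA p) else p.1

def sortString (s : String) : String :=
  let count := s.toList.foldl
    (fun d c => if d.contains c then d.insert c (d.getD c 0 + 1) else d.insert c 1)
    PySem.Dict.empty
  String.ofList (pvLoopA (s.toList.length + 1) ([], count))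

-- ===== PORT B =====
def sortString_alt (s : String) : String :=
  let cnt := s.toList.foldl (fun d c => d.insert c (d.getD c 0 + 1))
    (PySem.Dict.empty : PySem.Dict Char Int)
  let keys := PySem.List.sorted cnt.keys (fun c => c) false
  let K : Int := keys.length
  let occ := (PySem.List.enumerate keys).foldl
    (fun acc p =>
      (PySem.List.pyRange 0 (cnt.getD p.2 0) 1).foldl
        (fun acc2 j =>
          acc2 ++ [(j * K + (if PySem.Int.mod j 2 = 0 then p.1 else K - 1 - p.1), p.2)]) acc)
    ([] : List (Int × Char))
  String.ofList ((PySem.List.sorted occ (fun t => t.1) false).map (fun t => t.2))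

-- ===== PRECONDITION & SPEC =====
def Spec_sortString (s : String) (out : String) : Prop := out = sortString_alt s
instance (s : String) (out : String) : Decidable (Spec_sortString s out) := by unfold Spec_sortString; infer_instance

-- ===== CLAIM (what is proved, stated in full; the proofs are below) =====
def Claim_equal_sortString : Prop := ∀ (s : String), Dom_sortString s → Spec_sortString s (sortString s)

-- ===== LEMMAS AND PROOFS =====

lemma pvGetD_zero_of_not_contains (d : PySem.Dict Char Int) (c : Char)
    (h : d.contains c = false) : d.getD c 0 = 0 := by
  have := (PySem.Dict.get?_eq_none_iff_contains d c).mpr h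
  simp [PySem.Dict.getD, this]

lemma pvContains_of_getD_pos (d : PySem.Dict Char Int) (c : Char)
    (h : d.getD c 0 > 0) : d.contains c = true := by
  by_contra hc
  have h2 : d.contains c = false := by simpa using hc
  have := pvGetD_zero_of_not_contains d c h2
  omega

-- the sorted distinct characters of cs
def pvKeys (cs : List Char) : List Char :=
  PySem.List.sorted (PySem.Set.ofList cs) (fun c => c) false

-- remaining count of c after r complete rounds of A
def pvRem (cs : List Char) (r : Nat) (c : Char) : Int :=
  max ((cs.count c : Int) - 2 * r) 0

-- the characters one complete round (ascending then descending pass) emits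
def pvChunk (cs : List Char) (k : Int) : List Char :=
  (pvKeys cs).filter (fun c => (cs.count c : Int) > 2 * k)
    ++ (pvKeys cs).reverse.filter (fun c => (cs.count c : Int) > 2 * k + 1)

lemma pvMem_keys (cs : List Char) (c : Char) : c ∈ pvKeys cs ↔ c ∈ cs := by
  unfold pvKeys
  rw [PySem.List.mem_sorted, PySem.Set.mem_ofList]

lemma pvKeys_nodup (cs : List Char) : (pvKeys cs).Nodup :=
  ((PySem.List.sorted_perm _ _ _).nodup_iff).mpr (PySem.Set.nodup_ofList cs)

-- one pass of A over a duplicate-free list L: emitted characters and resulting dict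
lemma pvPass_spec (L : List Char) (hL : L.Nodup) (res : List Char) (d : PySem.Dict Char Int) :
    (L.foldl pvStep (res, d)).1 = res ++ L.filter (fun c => d.getD c 0 > 0)
    ∧ (∀ c, (L.foldl pvStep (res, d)).2.getD c 0 =
        if c ∈ L ∧ d.getD c 0 > 0 then d.getD c 0 - 1 else d.getD c 0)
    ∧ (L.foldl pvStep (res, d)).2.keys = d.keys := by
  induction L generalizing res d with
  | nil => simp
  | cons a L ih =>
    have haL : a ∉ L := (List.nodup_cons.mp hL).1
    have hLn : L.Nodup := (List.nodup_cons.mp hL).2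
    by_cases ha : d.getD a 0 > 0
    · have hstep : pvStep (res, d) a = (res ++ [a], d.insert a (d.getD a 0 - 1)) := by
        simp [pvStep, ha]
      have heq : ∀ c, c ∈ L → (d.insert a (d.getD a 0 - 1)).getD c 0 = d.getD c 0 := by
        intro c hc
        exact PySem.Dict.getD_insert_of_ne d _ _ (by rintro rfl; exact haL hc)
      obtain ⟨h1, h2, h3⟩ := ih hLn (res ++ [a]) (d.insert a (d.getD a 0 - 1))
      refine ⟨?_, ?_, ?_⟩
      · rw [List.foldl_cons, hstep, h1,
          List.filter_congr (q := fun c => decide (d.getD c 0 > 0))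
            (by intro c hc; simp [heq c hc])]
        simp [ha]
      · intro c
        rw [List.foldl_cons, hstep, h2 c]
        by_cases hca : c = a
        · subst hca
          simp [haL, ha, PySem.Dict.getD_insert_self]
        · have hg := PySem.Dict.getD_insert_of_ne d ((d.getD a 0 - 1)) (0:Int) (k := a) (k' := c) hca
          rw [hg]
          simp [hca]
      · rw [List.foldl_cons, hstep, h3,
          PySem.Dict.keys_insert_of_contains d _ (pvContains_of_getD_pos d a ha)]
    · have hstep : pvStep (res, d) a = (res, d) := by simp [pvStep, ha]
      obtain ⟨h1, h2, h3⟩ := ih hLn res d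
      refine ⟨?_, ?_, ?_⟩
      · rw [List.foldl_cons, hstep, h1]; simp [ha]
      · intro c
        rw [List.foldl_cons, hstep, h2 c]
        by_cases hca : c = a
        · subst hca; simp [ha]
        · simp [hca]
      · rw [List.foldl_cons, hstep, h3]

-- one round of A, under the invariant that the dict holds the round-r remaining counts
lemma pvRound_spec (cs : List Char) (r : Nat) (res : List Char) (d : PySem.Dict Char Int)
    (hd : ∀ c, d.getD c 0 = pvRem cs r c) (hk : d.keys = PySem.Set.ofList cs) :
    (pvRoundA (res, d)).1 = res ++ pvChunk cs r
    ∧ (∀ c, (pvRoundA (res, d)).2.getD c 0 = pvRem cs (r + 1) c)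
    ∧ (pvRoundA (res, d)).2.keys = PySem.Set.ofList cs := by
  have hasc : PySem.List.sorted d.keys (fun c => c) false = pvKeys cs := by
    rw [hk]; rfl
  obtain ⟨ha1, ha2, ha3⟩ := pvPass_spec (pvKeys cs) (pvKeys_nodup cs) res d
  set p1 := (pvKeys cs).foldl pvStep (res, d) with hp1
  -- dict after the ascending pass
  have hmid : ∀ c, p1.2.getD c 0 = max ((cs.count c : Int) - (2 * r + 1)) 0 := by
    intro c
    rw [ha2 c, hd c]
    by_cases hc : c ∈ pvKeys cs
    · by_cases hpos : pvRem cs r c > 0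
      · rw [if_pos ⟨hc, hpos⟩]
        unfold pvRem at *
        rcases max_cases ((cs.count c : Int) - 2 * r) 0 with ⟨he, hle⟩ | ⟨he, hle⟩ <;>
          rcases max_cases ((cs.count c : Int) - (2 * r + 1)) 0 with ⟨he2, hle2⟩ | ⟨he2, hle2⟩ <;>
            omega
      · rw [if_neg (by tauto)]
        unfold pvRem at *
        rcases max_cases ((cs.count c : Int) - 2 * r) 0 with ⟨he, hle⟩ | ⟨he, hle⟩ <;>
          rcases max_cases ((cs.count c : Int) - (2 * r + 1)) 0 with ⟨he2, hle2⟩ | ⟨he2, hle2⟩ <;>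
            omega
    · have hcnt : cs.count c = 0 := List.count_eq_zero.mpr (fun h => hc ((pvMem_keys cs c).mpr h))
      rw [if_neg (by tauto)]
      unfold pvRem
      rw [hcnt]
      simp
      omega
  have hdesc : PySem.List.sorted p1.2.keys (fun c => c) true = (pvKeys cs).reverse := by
    rw [ha3, hk]
    refine PySem.List.sorted_rev_eq_of_perm_of_pairwise_gt _ _ _ ?_ ?_
    · exact ((pvKeys cs).reverse_perm).trans (PySem.List.sorted_perm _ _ _)
    · exact (List.pairwise_reverse).mpr (by
        simpa using PySem.List.sorted_ofList_pairwise_lt cs)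
  obtain ⟨hb1, hb2, hb3⟩ := pvPass_spec ((pvKeys cs).reverse)
    (List.nodup_reverse.mpr (pvKeys_nodup cs)) p1.1 p1.2
  have hRound : pvRoundA (res, d) = ((pvKeys cs).reverse).foldl pvStep p1 := by
    show (PySem.List.sorted ((PySem.List.sorted d.keys (fun c => c) false).foldl pvStep (res, d)).2.keys
        (fun c => c) true).foldl pvStep _ = _
    rw [hasc, ← hp1, hdesc]
  rw [hRound]
  refine ⟨?_, ?_, ?_⟩
  · rw [hb1, ha1]
    unfold pvChunk
    rw [List.append_assoc]
    congr 1
    congr 1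
    · refine List.filter_congr ?_
      intro c _
      rw [hd c]
      simp only [decide_eq_decide]
      unfold pvRem
      rcases max_cases ((cs.count c : Int) - 2 * r) 0 with ⟨he, hle⟩ | ⟨he, hle⟩ <;>
        (rw [he]; omega)
    · refine List.filter_congr ?_
      intro c _
      rw [hmid c]
      simp only [decide_eq_decide]
      rcases max_cases ((cs.count c : Int) - (2 * r + 1)) 0 with ⟨he, hle⟩ | ⟨he, hle⟩ <;>
        (rw [he]; omega)
  · intro c
    rw [hb2 c, hmid c]
    unfold pvRem
    by_cases hc : c ∈ (pvKeys cs).reverse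
    · by_cases hpos : max ((cs.count c : Int) - (2 * r + 1)) 0 > 0
      · rw [if_pos ⟨hc, hpos⟩]
        rcases max_cases ((cs.count c : Int) - (2 * r + 1)) 0 with ⟨he, hle⟩ | ⟨he, hle⟩ <;>
          rcases max_cases ((cs.count c : Int) - 2 * (r + 1 : Nat)) 0 with ⟨he2, hle2⟩ | ⟨he2, hle2⟩ <;>
            push_cast at * <;> omega
      · rw [if_neg (by tauto)]
        rcases max_cases ((cs.count c : Int) - (2 * r + 1)) 0 with ⟨he, hle⟩ | ⟨he, hle⟩ <;>
          rcases max_cases ((cs.count c : Int) - 2 * (r + 1 : Nat)) 0 with ⟨he2, hle2⟩ | ⟨he2, hle2⟩ <;>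
            push_cast at * <;> omega
    · have hcnt : cs.count c = 0 := List.count_eq_zero.mpr
        (fun h => hc (List.mem_reverse.mpr ((pvMem_keys cs c).mpr h)))
      rw [if_neg (by tauto), hcnt]
      rw [max_eq_right (by push_cast; omega), max_eq_right (by push_cast; omega)]
  · rw [hb3, ha3, hk]

-- the maximal multiplicity
def pvM (cs : List Char) : Int :=
  PySem.List.maxD ((pvKeys cs).map (fun c => (cs.count c : Int))) (fun x => x) 0

-- the number of rounds A performs
def pvN (cs : List Char) : Nat := ((pvM cs + 1) / 2).toNat

lemma pvM_cons (cs : List Char) (x : Char) (t : List Char) (h : pvKeys cs = x :: t) :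
    pvM cs = (t.map (fun c => (cs.count c : Int))).foldl max (cs.count x : Int) := by
  unfold pvM
  rw [h, List.map_cons, PySem.List.maxD, PySem.List.max?_id_cons]
  rfl

lemma pvM_nonneg (cs : List Char) : 0 ≤ pvM cs := by
  cases hK : pvKeys cs with
  | nil =>
    unfold pvM
    rw [hK]
    simp [PySem.List.maxD, (PySem.List.max?_eq_none_iff _ _).mpr rfl]
  | cons x t =>
    rw [pvM_cons cs x t hK]
    have := (PySem.List.le_foldl_max (t.map (fun c => (cs.count c : Int))) (cs.count x : Int)).1
    omega

lemma pvM_ge (cs : List Char) (c : Char) : (cs.count c : Int) ≤ pvM cs := by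
  by_cases hc : c ∈ cs
  · have hmem : c ∈ pvKeys cs := (pvMem_keys cs c).mpr hc
    cases hK : pvKeys cs with
    | nil => rw [hK] at hmem; cases hmem
    | cons x t =>
      rw [hK] at hmem
      rw [pvM_cons cs x t hK]
      obtain ⟨h1, h2⟩ := PySem.List.le_foldl_max (t.map (fun c => (cs.count c : Int))) (cs.count x : Int)
      rcases List.mem_cons.mp hmem with rfl | hmt
      · exact h1
      · exact h2 _ (List.mem_map.mpr ⟨c, hmt, rfl⟩)
  · rw [List.count_eq_zero.mpr hc]
    simpa using pvM_nonneg cs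

lemma pvM_attained (cs : List Char) (h : 0 < pvM cs) :
    ∃ c ∈ cs, (cs.count c : Int) = pvM cs := by
  cases hK : pvKeys cs with
  | nil =>
    exfalso
    unfold pvM at h
    rw [hK] at h
    simp [PySem.List.maxD, (PySem.List.max?_eq_none_iff _ _).mpr rfl] at h
  | cons x t =>
    rw [pvM_cons cs x t hK]
    rcases PySem.List.foldl_max_mem (t.map (fun c => (cs.count c : Int))) (cs.count x : Int)
      with he | he
    · refine ⟨x, ?_, ?_⟩
      · exact (pvMem_keys cs x).mp (hK ▸ List.mem_cons_self)
      · exact he.symm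
    · obtain ⟨c, hct, hcv⟩ := List.mem_map.mp he
      refine ⟨c, ?_, ?_⟩
      · exact (pvMem_keys cs c).mp (hK ▸ List.mem_cons_of_mem x hct)
      · exact hcv

lemma pvM_le_len (cs : List Char) : pvM cs ≤ (cs.length : Int) := by
  by_cases h : 0 < pvM cs
  · obtain ⟨c, _, hc⟩ := pvM_attained cs h
    rw [← hc]
    exact_mod_cast List.count_le_length
  · omega

lemma pvSum_pos_iff (l : List Int) (h : ∀ x ∈ l, 0 ≤ x) :
    0 < l.sum ↔ ∃ x ∈ l, 0 < x := by
  induction l with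
  | nil => simp
  | cons a t ih =>
    have ha := h a List.mem_cons_self
    have ht := fun x hx => h x (List.mem_cons_of_mem a hx)
    have hts : 0 ≤ t.sum := List.sum_nonneg ht
    rw [List.sum_cons]
    constructor
    · intro hpos
      by_cases h0 : 0 < a
      · exact ⟨a, List.mem_cons_self, h0⟩
      · obtain ⟨x, hx, hx0⟩ := (ih ht).mp (by omega)
        exact ⟨x, List.mem_cons_of_mem a hx, hx0⟩
    · rintro ⟨x, hx, hx0⟩
      rcases List.mem_cons.mp hx with rfl | hxt
      · omega
      · have := (ih ht).mpr ⟨x, hxt, hx0⟩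
        omega

-- A's while-loop, run from round r with enough fuel, emits the chunks of rounds r, …, pvN-1
lemma pvLoopA_spec (cs : List Char) (fuel r : Nat) (res : List Char) (d : PySem.Dict Char Int)
    (hd : ∀ c, d.getD c 0 = pvRem cs r c) (hk : d.keys = PySem.Set.ofList cs)
    (hfuel : pvN cs ≤ fuel + r) :
    pvLoopA fuel (res, d) =
      res ++ (List.range' r (pvN cs - r)).flatMap (fun (j : Nat) => pvChunk cs (j : Int)) := by
  induction fuel generalizing r res d with
  | zero =>
    have : pvN cs - r = 0 := by omega
    simp [pvLoopA, this]
  | succ fuel ih =>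
    have hnd : d.keys.Nodup := hk ▸ PySem.Set.nodup_ofList cs
    have hvals : d.values = d.keys.map (fun k => d.getD k 0) :=
      PySem.Dict.values_eq_map_keys d hnd 0
    have hsum : (0 < d.values.sum) ↔ (r < pvN cs) := by
      rw [hvals]
      rw [pvSum_pos_iff _ (by
        intro x hx
        obtain ⟨c, _, rfl⟩ := List.mem_map.mp hx
        rw [hd c]
        unfold pvRem
        exact le_max_right _ _)]
      constructor
      · rintro ⟨x, hx, hx0⟩
        obtain ⟨c, _, rfl⟩ := List.mem_map.mp hx
        rw [hd c] at hx0
        unfold pvRem at hx0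
        have h1 : 2 * (r : Int) < cs.count c := by
          rcases max_cases ((cs.count c : Int) - 2 * r) 0 with ⟨he, _⟩ | ⟨he, _⟩ <;> omega
        have h2 := pvM_ge cs c
        unfold pvN
        omega
      · intro hr
        have hM : 2 * (r : Int) < pvM cs := by unfold pvN at hr; omega
        obtain ⟨c, hcm, hcv⟩ := pvM_attained cs (by omega)
        refine ⟨d.getD c 0, List.mem_map.mpr ⟨c, ?_, rfl⟩, ?_⟩
        · rw [hk]; exact (PySem.Set.mem_ofList _ _).mpr hcm
        · rw [hd c]
          unfold pvRem
          rw [max_eq_left (by omega)]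
          omega
    by_cases hr : r < pvN cs
    · obtain ⟨hr1, hr2, hr3⟩ := pvRound_spec cs r res d hd hk
      show (if (0:Int) < _ then _ else _) = _
      rw [if_pos (by simpa using hsum.mpr hr)]
      have hstep : pvRoundA (res, d) = ((pvRoundA (res, d)).1, (pvRoundA (res, d)).2) := rfl
      rw [hstep, ih (r + 1) _ _ hr2 hr3 (by omega), hr1]
      have hn : pvN cs - r = (pvN cs - (r + 1)) + 1 := by omega
      rw [hn, List.range'_succ, List.flatMap_cons, List.append_assoc]
    · show (if (0:Int) < _ then _ else _) = _
      rw [if_neg (by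
          intro hpos
          exact hr (hsum.mp (by simpa using hpos)))]
      have : pvN cs - r = 0 := by omega
      simp [this]

-- ========== B-side machinery ==========

-- the slot B assigns to the j-th copy of the character at ascending index i (K distinct chars)
def pvSlot (K i j : Int) : Int :=
  j * K + (if PySem.Int.mod j 2 = 0 then i else K - 1 - i)

-- the enumerated sorted distinct characters
def pvE (cs : List Char) : List (Int × Char) :=
  PySem.List.enumerate (pvKeys cs) 0

-- the slot/character pairs B's sort must produce for round k: ascending then descending phase
def pvAsc (cs : List Char) (k : Int) : List (Int × Char) :=
  ((pvE cs).filter (fun p => (cs.count p.2 : Int) > 2 * k)).map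
    (fun p => ((2 * k) * ((pvKeys cs).length : Int) + p.1, p.2))

def pvDesc (cs : List Char) (k : Int) : List (Int × Char) :=
  ((pvE cs).reverse.filter (fun p => (cs.count p.2 : Int) > 2 * k + 1)).map
    (fun p => ((2 * k + 1) * ((pvKeys cs).length : Int) + (((pvKeys cs).length : Int) - 1 - p.1), p.2))

-- the fully scheduled output, in emission order
def pvL (cs : List Char) : List (Int × Char) :=
  (List.range (pvN cs)).flatMap (fun (k : Nat) => pvAsc cs (k : Int) ++ pvDesc cs (k : Int))

lemma pvE_fst_mem (cs : List Char) (p : Int × Char) (hp : p ∈ pvE cs) :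
    0 ≤ p.1 ∧ p.1 < ((pvKeys cs).length : Int) := by
  have h1 : p.1 ∈ (pvE cs).map (·.1) := List.mem_map.mpr ⟨p, hp, rfl⟩
  rw [pvE, PySem.List.map_fst_enumerate, PySem.List.mem_pyRange_one] at h1
  simpa using h1

lemma pvE_snd_nodup (cs : List Char) : ((pvE cs).map (·.2)).Nodup := by
  rw [pvE, PySem.List.map_snd_enumerate]
  exact pvKeys_nodup cs

lemma pvE_fst_pairwise (cs : List Char) : (pvE cs).Pairwise (fun a b => a.1 < b.1) := by
  have h : ((pvE cs).map (·.1)).Pairwise (· < ·) := by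
    rw [pvE, PySem.List.map_fst_enumerate]
    exact PySem.List.pairwise_lt_pyRange_one 0 _
  exact (List.pairwise_map.mp h)

-- membership characterisation of the occurrence list B builds
lemma pvMem_flatMap_occ (cs : List Char) (x : Int × Char) :
    (x ∈ (pvE cs).flatMap (fun p => (PySem.List.pyRange 0 (cs.count p.2 : Int) 1).map
        (fun j => (pvSlot ((pvKeys cs).length : Int) p.1 j, p.2)))
      ↔ ∃ p ∈ pvE cs, ∃ j : Int, 0 ≤ j ∧ j < (cs.count p.2 : Int)
          ∧ x = (pvSlot ((pvKeys cs).length : Int) p.1 j, p.2)) := by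
  simp only [List.mem_flatMap, List.mem_map, PySem.List.mem_pyRange_one]
  constructor
  · rintro ⟨p, hp, j, ⟨hj0, hj1⟩, rfl⟩
    exact ⟨p, hp, j, hj0, hj1, rfl⟩
  · rintro ⟨p, hp, j, hj0, hj1, rfl⟩
    exact ⟨p, hp, j, ⟨hj0, hj1⟩, rfl⟩

-- membership characterisation of pvL
lemma pvMem_L (cs : List Char) (x : Int × Char) :
    x ∈ pvL cs ↔ ∃ k : Nat, k < pvN cs ∧ (x ∈ pvAsc cs (k : Int) ∨ x ∈ pvDesc cs (k : Int)) := by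
  unfold pvL
  constructor
  · intro h
    obtain ⟨k, hk, h⟩ := List.mem_flatMap.mp h
    exact ⟨k, List.mem_range.mp hk, List.mem_append.mp h⟩
  · rintro ⟨k, hk, h⟩
    exact List.mem_flatMap.mpr ⟨k, List.mem_range.mpr hk, List.mem_append.mpr h⟩

-- the two membership predicates agree
lemma pvMem_iff (cs : List Char) (x : Int × Char) :
    (x ∈ (pvE cs).flatMap (fun p => (PySem.List.pyRange 0 (cs.count p.2 : Int) 1).map
        (fun j => (pvSlot ((pvKeys cs).length : Int) p.1 j, p.2)))) ↔ x ∈ pvL cs := by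
  rw [pvMem_flatMap_occ, pvMem_L]
  have hM0 := pvM_nonneg cs
  constructor
  · rintro ⟨p, hp, j, hj0, hj1, rfl⟩
    have hcM : (cs.count p.2 : Int) ≤ pvM cs := pvM_ge cs p.2
    have hmod := PySem.Int.mod_eq_emod_of_pos (a := j) (b := 2) (by norm_num)
    by_cases hpar : j % 2 = 0
    · refine ⟨(j / 2).toNat, by unfold pvN; omega, Or.inl ?_⟩
      refine List.mem_map.mpr ⟨p, List.mem_filter.mpr ⟨hp, ?_⟩, ?_⟩
      · simp only [decide_eq_true_eq]
        omega
      · have h2k : 2 * (((j / 2).toNat : Nat) : Int) = j := by omega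
        unfold pvSlot
        rw [hmod, if_pos hpar, h2k]
    · refine ⟨(j / 2).toNat, by unfold pvN; omega, Or.inr ?_⟩
      refine List.mem_map.mpr ⟨p, List.mem_filter.mpr ⟨List.mem_reverse.mpr hp, ?_⟩, ?_⟩
      · simp only [decide_eq_true_eq]
        omega
      · have h2k : 2 * (((j / 2).toNat : Nat) : Int) + 1 = j := by omega
        unfold pvSlot
        rw [hmod, if_neg (by omega), h2k]
  · rintro ⟨k, hkN, h | h⟩
    · obtain ⟨p, hpf, rfl⟩ := List.mem_map.mp h
      obtain ⟨hp, hcond⟩ := List.mem_filter.mp hpf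
      simp only [decide_eq_true_eq] at hcond
      refine ⟨p, hp, 2 * (k : Int), by omega, by omega, ?_⟩
      unfold pvSlot
      rw [PySem.Int.mod_eq_emod_of_pos (by norm_num), if_pos (by omega)]
    · obtain ⟨p, hpf, rfl⟩ := List.mem_map.mp h
      obtain ⟨hp, hcond⟩ := List.mem_filter.mp hpf
      simp only [decide_eq_true_eq] at hcond
      refine ⟨p, List.mem_reverse.mp hp, 2 * (k : Int) + 1, by omega, by omega, ?_⟩
      unfold pvSlot
      rw [PySem.Int.mod_eq_emod_of_pos (by norm_num), if_neg (by omega)]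

-- keys of chunk k are in [2kK, 2(k+1)K)
lemma pvChunk_key_bounds (cs : List Char) (k : Int) (x : Int × Char)
    (hx : x ∈ pvAsc cs k ∨ x ∈ pvDesc cs k) :
    2 * k * ((pvKeys cs).length : Int) ≤ x.1
      ∧ x.1 < 2 * (k + 1) * ((pvKeys cs).length : Int) := by
  set K : Int := ((pvKeys cs).length : Int) with hK
  have h1 : 2 * (k + 1) * K = 2 * k * K + K + K := by ring
  have h2 : (2 * k + 1) * K = 2 * k * K + K := by ring
  rcases hx with hx | hx
  · obtain ⟨p, hp, rfl⟩ := List.mem_map.mp hx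
    obtain ⟨hi0, hi1⟩ := pvE_fst_mem cs p (List.mem_of_mem_filter hp)
    constructor <;> simp only [] <;> linarith
  · obtain ⟨p, hp, rfl⟩ := List.mem_map.mp hx
    obtain ⟨hi0, hi1⟩ := pvE_fst_mem cs p (List.mem_reverse.mp (List.mem_of_mem_filter hp))
    constructor <;> simp only [] <;> linarith

-- pvL's slots are strictly increasing
lemma pvChunk_pairwise (cs : List Char) (k : Int) :
    (pvAsc cs k ++ pvDesc cs k).Pairwise (fun (a b : Int × Char) => a.1 < b.1) := by
  set K : Int := ((pvKeys cs).length : Int) with hK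
  rw [List.pairwise_append]
  refine ⟨?_, ?_, ?_⟩
  · refine List.pairwise_map.mpr (List.Pairwise.filter _ ?_)
    exact (pvE_fst_pairwise cs).imp (by intro a b h; simpa using by linarith)
  · refine List.pairwise_map.mpr (List.Pairwise.filter _ ?_)
    have := (List.pairwise_reverse (l := pvE cs)
      (R := fun (a b : Int × Char) => b.1 < a.1)).mpr (pvE_fst_pairwise cs)
    exact this.imp (by intro a b h; simpa using by linarith)
  · intro a ha b hb
    obtain ⟨p, hp, rfl⟩ := List.mem_map.mp ha
    obtain ⟨q, hq, rfl⟩ := List.mem_map.mp hb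
    obtain ⟨hp0, hp1⟩ := pvE_fst_mem cs p (List.mem_of_mem_filter hp)
    obtain ⟨hq0, hq1⟩ := pvE_fst_mem cs q (List.mem_reverse.mp (List.mem_of_mem_filter hq))
    have h2 : (2 * k + 1) * K = 2 * k * K + K := by ring
    simp only []
    linarith

lemma pvL_pairwise (cs : List Char) : (pvL cs).Pairwise (fun a b => a.1 < b.1) := by
  unfold pvL
  have hK0 : (0 : Int) ≤ ((pvKeys cs).length : Int) := by positivity
  induction pvN cs with
  | zero => simp
  | succ n ih =>
    rw [List.range_succ, List.flatMap_append, List.flatMap_singleton]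
    rw [List.pairwise_append]
    refine ⟨ih, pvChunk_pairwise cs (n : Int), ?_⟩
    intro a ha b hb
    obtain ⟨k, hk, hka⟩ := List.mem_flatMap.mp ha
    have hbnd1 := (pvChunk_key_bounds cs (k : Int) a (List.mem_append.mp hka)).2
    have hbnd2 := (pvChunk_key_bounds cs (n : Int) b (List.mem_append.mp hb)).1
    have hkn : ((k : Int) + 1) ≤ (n : Int) := by
      have := List.mem_range.mp hk
      exact_mod_cast this
    have : 2 * ((k : Int) + 1) * ((pvKeys cs).length : Int)
        ≤ 2 * (n : Int) * ((pvKeys cs).length : Int) := by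
      apply mul_le_mul_of_nonneg_right _ hK0
      linarith
    linarith

-- a flatMap is duplicate-free when the outer tags are distinct and each block is, every
-- element of a block carrying its tag
lemma pvFlatMap_nodup (l : List (Int × Char)) (f : Int × Char → List (Int × Char))
    (hsnd : (l.map (·.2)).Nodup) (hin : ∀ p ∈ l, (f p).Nodup)
    (hproj : ∀ p ∈ l, ∀ y ∈ f p, y.2 = p.2) : (l.flatMap f).Nodup := by
  induction l with
  | nil => simp
  | cons p l ih =>
    rw [List.flatMap_cons, List.nodup_append]
    rw [List.map_cons] at hsnd
    have hc := List.nodup_cons.mp hsnd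
    refine ⟨hin p List.mem_cons_self, ?_, ?_⟩
    · exact ih hc.2 (fun q hq => hin q (List.mem_cons_of_mem p hq))
        (fun q hq => hproj q (List.mem_cons_of_mem p hq))
    · intro a ha b hb hab
      subst hab
      obtain ⟨q, hq, hbq⟩ := List.mem_flatMap.mp hb
      have e1 := hproj p List.mem_cons_self a ha
      have e2 := hproj q (List.mem_cons_of_mem p hq) a hbq
      exact hc.1 (e1 ▸ e2 ▸ List.mem_map.mpr ⟨q, hq, rfl⟩)

-- slots of distinct copies of the same character differ
lemma pvSlot_inj (K i j1 j2 : Int) (hi0 : 0 ≤ i) (hi1 : i < K)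
    (h : pvSlot K i j1 = pvSlot K i j2) : j1 = j2 := by
  unfold pvSlot at h
  have hb1 : 0 ≤ (if PySem.Int.mod j1 2 = 0 then i else K - 1 - i)
      ∧ (if PySem.Int.mod j1 2 = 0 then i else K - 1 - i) < K := by
    split_ifs <;> omega
  have hb2 : 0 ≤ (if PySem.Int.mod j2 2 = 0 then i else K - 1 - i)
      ∧ (if PySem.Int.mod j2 2 = 0 then i else K - 1 - i) < K := by
    split_ifs <;> omega
  rcases lt_trichotomy j1 j2 with hlt | he | hlt
  · exfalso
    have : (j1 + 1) * K ≤ j2 * K := mul_le_mul_of_nonneg_right (by omega) (by omega)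
    rw [add_mul, one_mul] at this
    omega
  · exact he
  · exfalso
    have : (j2 + 1) * K ≤ j1 * K := mul_le_mul_of_nonneg_right (by omega) (by omega)
    rw [add_mul, one_mul] at this
    omega

-- the occurrence list is duplicate-free
lemma pvOcc_nodup (cs : List Char) :
    ((pvE cs).flatMap (fun p => (PySem.List.pyRange 0 (cs.count p.2 : Int) 1).map
        (fun j => (pvSlot ((pvKeys cs).length : Int) p.1 j, p.2)))).Nodup := by
  refine pvFlatMap_nodup _ _ (pvE_snd_nodup cs) ?_ ?_
  case refine_2 =>
    intro p _ y hy
    obtain ⟨j, _, rfl⟩ := List.mem_map.mp hy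
    rfl
  intro p hp
  obtain ⟨hi0, hi1⟩ := pvE_fst_mem cs p hp
  refine (List.nodup_map_iff_inj_on (PySem.List.nodup_pyRange_one _ _)).mpr ?_
  intro j1 h1 j2 h2 heq
  have hs : pvSlot ((pvKeys cs).length : Int) p.1 j1
      = pvSlot ((pvKeys cs).length : Int) p.1 j2 := congrArg Prod.fst heq
  exact pvSlot_inj _ _ _ _ hi0 hi1 hs

-- filtering an enumeration on the element only, then projecting, is filtering the list
lemma pvEnumFilterSnd (l : List Char) (q : Char → Bool) : ∀ (st : Int),
    ((PySem.List.enumerate l st).filter (fun p => q p.2)).map (fun t => t.2) = l.filter q := by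
  induction l with
  | nil => intro st; simp [PySem.List.enumerate]
  | cons a l ih =>
    intro st
    rw [PySem.List.enumerate_cons]
    by_cases h : q a <;> simp [h, ih]

-- projecting pvL to characters gives exactly A's chunk sequence
lemma pvL_map_snd (cs : List Char) :
    (pvL cs).map (fun t => t.2) =
      (List.range (pvN cs)).flatMap (fun (k : Nat) => pvChunk cs (k : Int)) := by
  unfold pvL
  rw [List.map_flatMap]
  congr 1
  funext k
  rw [List.map_append]
  unfold pvAsc pvDesc pvChunk pvE
  rw [List.map_map, List.map_map]
  simp only [Function.comp_def]
  congr 1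
  · exact pvEnumFilterSnd (pvKeys cs) (fun c => decide ((cs.count c : Int) > 2 * (k : Int))) 0
  · rw [List.filter_reverse, List.map_reverse]
    have := pvEnumFilterSnd (pvKeys cs)
      (fun c => decide ((cs.count c : Int) > 2 * (k : Int) + 1)) 0
    rw [this, ← List.filter_reverse]

-- B's sorted occurrence list IS pvL
lemma pvSorted_occ (cs : List Char) :
    PySem.List.sorted ((pvE cs).flatMap (fun p =>
        (PySem.List.pyRange 0 (cs.count p.2 : Int) 1).map
          (fun j => (pvSlot ((pvKeys cs).length : Int) p.1 j, p.2))))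
      (fun t => t.1) false = pvL cs := by
  refine PySem.List.sorted_eq_of_perm_of_pairwise_lt _ _ _ ?_ (pvL_pairwise cs)
  refine (List.perm_ext_iff_of_nodup ?_ ?_).mpr ?_
  · exact (pvL_pairwise cs).imp (fun h => by intro he; subst he; exact lt_irrefl _ h)
  · exact pvOcc_nodup cs
  · intro x
    exact (pvMem_iff cs x).symm

-- the two ports agree on every string
set_option maxHeartbeats 1000000 in
lemma pvMain (s : String) : sortString s = sortString_alt s := by
  set cs := s.toList with hcs
  have hcountA : cs.foldl
      (fun d c => if d.contains c then d.insert c (d.getD c 0 + 1) else d.insert c 1)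
      PySem.Dict.empty = PySem.Dict.counter cs := by
    rw [PySem.List.foldl_congr_mem cs _ (fun d c => d.insert c (d.getD c 0 + 1)) _ ?_]
    · exact PySem.Dict.foldl_insert_getD_add_one_eq_counter cs
    · intro d c _
      by_cases h : d.contains c = true
      · simp [h]
      · have h' : d.contains c = false := by simpa using h
        rw [if_neg (by simp [h'])]
        show d.insert c 1 = d.insert c (d.getD c 0 + 1)
        rw [pvGetD_zero_of_not_contains d c h']
        norm_num
  have hA : pvLoopA (cs.length + 1) ([], PySem.Dict.counter cs) =
      [] ++ (List.range' 0 (pvN cs - 0)).flatMap (fun (j : Nat) => pvChunk cs (j : Int)) := by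
    refine pvLoopA_spec cs (cs.length + 1) 0 [] _ ?_ ?_ ?_
    · intro c
      rw [PySem.Dict.getD_counter]
      simp [pvRem]
    · exact PySem.Dict.keys_counter cs
    · have h1 := pvM_le_len cs
      have h2 := pvM_nonneg cs
      unfold pvN
      omega
  have hcountB : cs.foldl (fun d c => d.insert c (d.getD c 0 + 1)) PySem.Dict.empty
      = PySem.Dict.counter cs := PySem.Dict.foldl_insert_getD_add_one_eq_counter cs
  have hkeys : PySem.List.sorted (PySem.Dict.counter cs).keys (fun c => c) false = pvKeys cs := by
    rw [PySem.Dict.keys_counter]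
    rfl
  have hfun : (fun (acc : List (Int × Char)) (p : Int × Char) =>
      (PySem.List.pyRange 0 ((PySem.Dict.counter cs).getD p.2 0) 1).foldl
        (fun acc2 j =>
          acc2 ++ [(j * ((pvKeys cs).length : Int)
            + (if PySem.Int.mod j 2 = 0 then p.1 else ((pvKeys cs).length : Int) - 1 - p.1), p.2)])
        acc)
    = (fun (acc : List (Int × Char)) (p : Int × Char) =>
        acc ++ (PySem.List.pyRange 0 (cs.count p.2 : Int) 1).map
          (fun j => (pvSlot ((pvKeys cs).length : Int) p.1 j, p.2))) := by
    funext acc p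
    rw [PySem.Dict.getD_counter]
    exact PySem.List.foldl_append_singleton_eq_map
      (fun j => (pvSlot ((pvKeys cs).length : Int) p.1 j, p.2)) _ acc
  have hsorted := pvSorted_occ cs
  rw [pvE] at hsorted
  unfold sortString sortString_alt
  simp only [← hcs, hcountA, hcountB, hkeys, hA, hfun]
  rw [PySem.List.foldl_append_eq_flatMap]
  simp only [List.nil_append]
  rw [hsorted, pvL_map_snd, List.range_eq_range', Nat.sub_zero]

-- ===== VERDICT (by name: the statement is the Claim_ definition above) =====
theorem sortString_spec : Claim_equal_sortString := by
  intro s _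
  exact pvMain s
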